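-- pv_equiv track=rewrite | github.com/coval-ai/benchmarks | wer_calculator.py | squish_numbers
-- ===== SOURCE A (Python) =====
-- def squish_numbers(sentence):
--     characters = list(sentence)
--     if len(characters) < 3:
--         return sentence
--
--     filtered_characters = []
--     for i in range(len(characters)):
--         if i == 0:
--             filtered_characters.append(characters[i])
--             continue
--
--         if i == len(characters) - 1:
--             filtered_characters.append(characters[i])
--             continue
--
--         previous_character = characters[i-1]
--         current_character = characters[i]
--         next_character = characters[i+1]
--
--         should_skip = previous_character.isdigit() and current_character == " " and next_character.isdigit()
--         if should_skip:
--             continue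
--         else:
--             filtered_characters.append(current_character)
--
--     return ''.join(filtered_characters)
-- ===== SOURCE B (Python) =====
-- def squish_numbers(sentence):
--     out = []
--     prev_digit = False
--     pending = False
--     for ch in sentence:
--         if pending:
--             if not ch.isdigit():
--                 out.append(" ")
--             pending = False
--         if ch == " " and prev_digit:
--             pending = True
--         else:
--             out.append(ch)
--         prev_digit = ch.isdigit()
--     if pending:
--         out.append(" ")
--     return "".join(out)
-- ===== Notes on version B (the rewrite author's own statement) =====
-- stated objective: faster
-- what changed: Replaced A's index-arithmetic pass over range(len) with a triple lookahead window (and a len<3 early return) by a single streaming for-each pass that keeps a prev-char-was-digit flag and holds at most one pending space, dropped or flushed when the next character arrives.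
import Mathlib
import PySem

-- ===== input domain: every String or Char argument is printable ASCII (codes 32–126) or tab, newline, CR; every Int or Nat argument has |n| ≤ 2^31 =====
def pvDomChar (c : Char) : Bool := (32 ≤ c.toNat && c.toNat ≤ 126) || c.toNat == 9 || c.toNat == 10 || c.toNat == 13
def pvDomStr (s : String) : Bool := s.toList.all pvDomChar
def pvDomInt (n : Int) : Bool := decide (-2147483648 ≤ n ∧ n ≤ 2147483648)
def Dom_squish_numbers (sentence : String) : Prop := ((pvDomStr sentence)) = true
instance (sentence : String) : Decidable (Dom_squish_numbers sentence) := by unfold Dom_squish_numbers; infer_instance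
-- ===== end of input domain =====

-- B replaces A's index-arithmetic triple-window scan by a single streaming pass with a held-pending-space state machine (objective: faster by a constant factor — no per-index window re-reads; measured).

-- ===== PORT A =====
-- literal transliteration of A: list of chars, early return for len < 3, index loop over range(len) with
-- first/last special cases and a (i-1, i, i+1) window test; indexing via pyGetD (always in range here).
def squish_numbers (sentence : String) : String :=
  let characters := sentence.toList
  if characters.length < 3 then sentence
  else
    let filtered_characters :=
      (PySem.List.pyRange 0 (characters.length : Int) 1).foldl (fun acc i =>
        if i = 0 then acc ++ [PySem.List.pyGetD characters i ' ']
        else if i = (characters.length : Int) - 1 then acc ++ [PySem.List.pyGetD characters i ' ']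
        else
          let previous_character := PySem.List.pyGetD characters (i - 1) ' '
          let current_character := PySem.List.pyGetD characters i ' '
          let next_character := PySem.List.pyGetD characters (i + 1) ' '
          if PySem.Chars.isdigit previous_character && (current_character == ' ')
              && PySem.Chars.isdigit next_character then acc
          else acc ++ [current_character]) []
    String.ofList filtered_characters

-- ===== PORT B =====
-- literal transliteration of B's streaming loop: state = (prev char was digit, a space is held pending).
def pvLoopB : Bool → Bool → List Char → List Char → List Char
  | _, pending, acc, [] => if pending then acc ++ [' '] else acc
  | prevDigit, pending, acc, c :: rest =>
      let acc1 := if pending then (if PySem.Chars.isdigit c then acc else acc ++ [' ']) else acc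
      if c == ' ' && prevDigit then pvLoopB (PySem.Chars.isdigit c) true acc1 rest
      else pvLoopB (PySem.Chars.isdigit c) false (acc1 ++ [c]) rest

def squish_numbers_alt (sentence : String) : String :=
  String.ofList (pvLoopB false false [] sentence.toList)

-- ===== PRECONDITION & SPEC =====
def Spec_squish_numbers (sentence : String) (out : String) : Prop := out = squish_numbers_alt sentence
instance (sentence : String) (out : String) : Decidable (Spec_squish_numbers sentence out) := by unfold Spec_squish_numbers; infer_instance

-- ===== CLAIM (what is proved, stated in full; the proofs are below) =====
def Claim_equal_squish_numbers : Prop := ∀ (sentence : String), Dom_squish_numbers sentence → Spec_squish_numbers sentence (squish_numbers sentence)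

-- ===== LEMMAS AND PROOFS =====

-- lookahead form of the filter: `pvWin b cs` filters cs knowing whether the previous char was a digit
def pvWin : Bool → List Char → List Char
  | _, [] => []
  | _, [c] => [c]
  | b, c :: nx :: rest =>
      (if b && (c == ' ') && PySem.Chars.isdigit nx then [] else [c]) ++ pvWin (PySem.Chars.isdigit c) (nx :: rest)

-- resolution of a pending space at the start of the remaining input
def pvPWin : List Char → List Char
  | [] => [' ']
  | c :: rest => (if PySem.Chars.isdigit c then [] else [' ']) ++ pvWin false (c :: rest)

-- the middle of A's output: the window filter over interior positions
def pvMid : List Char → List Char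
  | a :: b :: c :: rest =>
      (if PySem.Chars.isdigit a && (b == ' ') && PySem.Chars.isdigit c then [] else [b]) ++ pvMid (b :: c :: rest)
  | _ => []

-- the per-index emission of A's loop, as a function of the index
def pvG (cs : List Char) (i : Int) : List Char :=
  if i = 0 then [PySem.List.pyGetD cs i ' ']
  else if i = (cs.length : Int) - 1 then [PySem.List.pyGetD cs i ' ']
  else if PySem.Chars.isdigit (PySem.List.pyGetD cs (i - 1) ' ') && (PySem.List.pyGetD cs i ' ' == ' ')
        && PySem.Chars.isdigit (PySem.List.pyGetD cs (i + 1) ' ') then []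
  else [PySem.List.pyGetD cs i ' ']

-- interior-window emission by Nat index
def pvTrip (cs : List Char) (j : Nat) : List Char :=
  if PySem.Chars.isdigit (cs.getD j ' ') && (cs.getD (j + 1) ' ' == ' ') && PySem.Chars.isdigit (cs.getD (j + 2) ' ')
  then [] else [cs.getD (j + 1) ' ']

def pvGN (cs : List Char) (k : Nat) : List Char := pvG cs (k : Int)

lemma pvWin_cons_false : ∀ (c : Char) (rest : List Char), pvWin false (c :: rest) = c :: pvWin (PySem.Chars.isdigit c) rest := by
  intro c rest
  cases rest with
  | nil => simp [pvWin]
  | cons nx r => simp [pvWin]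

lemma pvLoopB_char : ∀ (cs : List Char),
    (∀ (b : Bool) (acc : List Char), pvLoopB b false acc cs = acc ++ pvWin b cs) ∧
    (∀ (acc : List Char), pvLoopB false true acc cs = acc ++ pvPWin cs) := by
  intro cs
  induction cs with
  | nil => constructor <;> intros <;> simp [pvLoopB, pvWin, pvPWin]
  | cons c rest ih =>
    constructor
    · intro b acc
      by_cases h : (c == ' ' && b) = true
      · have hc : c = ' ' := by cases b <;> simp_all
        have hb : b = true := by cases b <;> simp_all
        subst hc hb
        have hd0 : PySem.Chars.isdigit ' ' = false := by decide
        simp only [pvLoopB, h, if_pos, hd0, Bool.false_eq_true, ite_false]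
        rw [(ih.2) acc]
        cases rest with
        | nil => simp [pvWin, pvPWin]
        | cons nx r =>
          simp only [pvWin, pvPWin, hd0]
          by_cases hd : PySem.Chars.isdigit nx = true <;>
            simp [hd, pvWin_cons_false]
      · simp only [pvLoopB, h, Bool.false_eq_true, ite_false]
        rw [(ih.1) (PySem.Chars.isdigit c) (acc ++ [c])]
        cases rest with
        | nil => simp [pvWin]
        | cons nx r =>
          have hf : (b && (c == ' ') && PySem.Chars.isdigit nx) = false := by
            cases b <;> simp_all [Bool.and_comm]
          simp [pvWin, hf]
    · intro acc
      simp only [pvLoopB]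
      have : (c == ' ' && false) = false := by simp
      simp only [this, if_neg Bool.false_ne_true]
      rw [(ih.1) (PySem.Chars.isdigit c)]
      simp [pvPWin, pvWin_cons_false]
      by_cases hd : PySem.Chars.isdigit c = true <;> simp [hd]

lemma pvWin_midm : ∀ (rest : List Char) (a c : Char),
    pvWin (PySem.Chars.isdigit a) (c :: rest) = pvMid (a :: c :: rest) ++ [rest.getLastD c] := by
  intro rest
  induction rest with
  | nil => intro a c; simp [pvWin, pvMid]
  | cons nx r ih =>
    intro a c
    simp only [pvWin, pvMid, List.getLastD_cons]
    rw [ih c nx]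
    simp

lemma pvTrip_shift (cs : List Char) (a : Char) (j : Nat) : pvTrip (a :: cs) (j + 1) = pvTrip cs j := by
  simp [pvTrip]

lemma pvMid_trip : ∀ (tail : List Char) (a b : Char),
    (List.range tail.length).flatMap (pvTrip (a :: b :: tail)) = pvMid (a :: b :: tail) := by
  intro tail
  induction tail with
  | nil => intro a b; simp [pvMid]
  | cons c r ih =>
    intro a b
    rw [List.length_cons, List.range_succ_eq_map, List.flatMap_cons, List.flatMap_map]
    have h1 : pvTrip (a :: b :: c :: r) 0 = (if PySem.Chars.isdigit a && (b == ' ') && PySem.Chars.isdigit c then [] else [b]) := by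
      simp [pvTrip]
    have h2 : (fun j => pvTrip (a :: b :: c :: r) (j + 1)) = pvTrip (b :: c :: r) := by
      funext j; exact pvTrip_shift _ a j
    show pvTrip (a :: b :: c :: r) 0 ++ (List.range r.length).flatMap (fun j => pvTrip (a :: b :: c :: r) (j.succ)) = pvMid (a :: b :: c :: r)
    simp only [Nat.succ_eq_add_one, h2, ih b c, h1, pvMid]

lemma pvWin_small : ∀ (cs : List Char), cs.length < 3 → pvWin false cs = cs := by
  intro cs h
  match cs with
  | [] => rfl
  | [c] => rfl
  | [c, d] => simp [pvWin]
  | a :: b :: c :: r => simp at h; omega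

lemma pvG_interior (cs : List Char) (j : Nat) (h : j + 2 < cs.length) :
    pvGN cs (j + 1) = pvTrip cs j := by
  have h0 : ((j + 1 : Nat) : Int) ≠ 0 := by omega
  have h1 : ((j + 1 : Nat) : Int) ≠ (cs.length : Int) - 1 := by omega
  have e1 : ((j + 1 : Nat) : Int) - 1 = ((j : Nat) : Int) := by omega
  have e2 : ((j + 1 : Nat) : Int) + 1 = ((j + 2 : Nat) : Int) := by omega
  simp only [pvGN, pvG, h0, h1, e1, e2, PySem.List.pyGetD_natCast, pvTrip, ite_false]

lemma pvA_flat (cs : List Char) (h : 3 ≤ cs.length) :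
    (List.range cs.length).flatMap (pvGN cs) =
      cs.getD 0 ' ' :: (pvMid cs ++ [cs.getD (cs.length - 1) ' ']) := by
  match cs, h with
  | a :: b :: c :: r, _ =>
    set cs := a :: b :: c :: r with hcs
    have hsplit : List.range cs.length = 0 :: (List.range ((c :: r).length)).map (· + 1) ++ [cs.length - 1] := by
      rw [show cs.length = ((c :: r).length + 1) + 1 by simp [hcs]]
      rw [List.range_succ, List.range_succ_eq_map]
      simp
    rw [hsplit, List.flatMap_append, List.flatMap_cons, List.flatMap_map, List.flatMap_singleton]
    have hG0 : pvGN cs 0 = [cs.getD 0 ' '] := by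
      simp [pvGN, pvG, PySem.List.pyGetD_zero, List.getD]
    have hGlast : pvGN cs (cs.length - 1) = [cs.getD (cs.length - 1) ' '] := by
      have hn : 3 ≤ cs.length := by simp [hcs]
      have h0 : ((cs.length - 1 : Nat) : Int) ≠ 0 := by omega
      have h1 : ((cs.length - 1 : Nat) : Int) = (cs.length : Int) - 1 := by omega
      simp only [pvGN, pvG, h1, if_pos]
      rw [← h1]
      simp [List.getD]
    have hmid : (List.range ((c :: r).length)).flatMap (fun (a : Nat) => pvGN cs (a + 1)) =
        (List.range ((c :: r).length)).flatMap (pvTrip cs) := by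
      apply List.flatMap_congr
      intro j hj
      have hj' : j < (c :: r).length := List.mem_range.mp hj
      simp only [List.length_cons] at hj'
      refine pvG_interior cs j ?_
      simp only [hcs, List.length_cons]
      omega
    rw [hmid, hG0, hGlast, hcs, pvMid_trip]
    simp

lemma pv_getD_last : ∀ (l : List Char) (a : Char), (a :: l).getD l.length ' ' = l.getLastD a := by
  intro l
  induction l with
  | nil => intro a; rfl
  | cons b l ih =>
    intro a
    rw [List.getLastD_cons, ← ih b]
    rfl

lemma pvWin_eq_A (cs : List Char) (h : 3 ≤ cs.length) :
    pvWin false cs = cs.getD 0 ' ' :: (pvMid cs ++ [cs.getD (cs.length - 1) ' ']) := by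
  match cs, h with
  | c0 :: c1 :: t :: ts, _ =>
    rw [pvWin_cons_false, pvWin_midm]
    have hlast : (c0 :: c1 :: t :: ts).getD ((c0 :: c1 :: t :: ts).length - 1) ' ' = (t :: ts).getLastD c1 := by
      rw [show (c0 :: c1 :: t :: ts).length - 1 = (t :: ts).length + 1 by simp]
      rw [show ((c0 :: c1 :: t :: ts).getD ((t :: ts).length + 1) ' ') = ((c1 :: t :: ts).getD (t :: ts).length ' ') from rfl]
      exact pv_getD_last (t :: ts) c1
    rw [hlast]
    rfl

-- ===== VERDICT (by name: the statement is the Claim_ definition above) =====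
theorem squish_numbers_spec : Claim_equal_squish_numbers := by
  intro s _
  unfold Spec_squish_numbers squish_numbers squish_numbers_alt
  rw [(pvLoopB_char s.toList).1 false []]
  simp only [List.nil_append]
  by_cases hlen : s.toList.length < 3
  · rw [if_pos hlen, pvWin_small s.toList hlen]
    simp
  · rw [if_neg hlen]
    have hb : (fun (acc : List Char) (i : Int) =>
        if i = 0 then acc ++ [PySem.List.pyGetD s.toList i ' ']
        else if i = (s.toList.length : Int) - 1 then acc ++ [PySem.List.pyGetD s.toList i ' ']
        else
          let previous_character := PySem.List.pyGetD s.toList (i - 1) ' '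
          let current_character := PySem.List.pyGetD s.toList i ' '
          let next_character := PySem.List.pyGetD s.toList (i + 1) ' '
          if PySem.Chars.isdigit previous_character && (current_character == ' ')
              && PySem.Chars.isdigit next_character then acc
          else acc ++ [current_character]) = fun acc i => acc ++ pvG s.toList i := by
      funext acc i
      simp only [pvG]
      split_ifs <;> simp
    rw [hb, PySem.List.foldl_append_eq_flatMap, PySem.List.pyRange_zero_nat, List.flatMap_map]
    rw [show (fun (a : Nat) => pvG s.toList ((a : Nat) : Int)) = pvGN s.toList from rfl]
    rw [pvA_flat s.toList (by omega), pvWin_eq_A s.toList (by omega)]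
    simp
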